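-- pv_equiv track=rewrite | github.com/yashbalan/Final_Assignment | Q16.py | extractDup
-- ===== SOURCE A (Python) =====
-- def extractDup(lst):
--     seen = set()
--     duplicates = set()
--
--     for num in lst:
--         if num in seen and num not in duplicates:
--             duplicates.add(num)
--         seen.add(num)
--
--     return sorted(duplicates)
-- ===== SOURCE B (Python) =====
-- def extractDup(lst):
--     res = []
--     prev = None
--     for x in sorted(lst):
--         if prev == x and (not res or res[-1] != x):
--             res.append(x)
--         prev = x
--     return res
-- ===== Notes on version B (the rewrite author's own statement) =====
-- stated objective: alternative
-- what changed: Replaces set-based on-the-fly duplicate detection with a sort-then-scan algorithm: sort the list first, then walk it once comparing each element to its predecessor, emitting a value the first time two adjacent copies are seen; no sets or hash tables are used and the output is built already sorted instead of being sorted at the end.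
import Mathlib
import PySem

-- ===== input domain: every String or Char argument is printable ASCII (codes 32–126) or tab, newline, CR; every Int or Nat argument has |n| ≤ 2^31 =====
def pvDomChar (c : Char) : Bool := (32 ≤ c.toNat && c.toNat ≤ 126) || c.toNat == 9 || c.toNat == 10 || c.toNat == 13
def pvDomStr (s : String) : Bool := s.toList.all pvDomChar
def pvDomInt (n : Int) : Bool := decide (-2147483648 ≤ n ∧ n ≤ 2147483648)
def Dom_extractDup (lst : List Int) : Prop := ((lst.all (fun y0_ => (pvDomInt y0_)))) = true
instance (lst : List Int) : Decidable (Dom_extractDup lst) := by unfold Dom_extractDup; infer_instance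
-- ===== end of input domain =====

-- B replaces A's set-based on-the-fly duplicate detection by sort-then-scan: sort first, then one
-- pass comparing each element with its predecessor, emitting on the first adjacent repeat; same cost.

-- ===== PORT A =====
-- for num in lst: if num in seen and num not in duplicates: duplicates.add(num); seen.add(num)
def extractDup (lst : List Int) : List Int :=
  let st := lst.foldl
    (fun (st : PySem.Set Int × PySem.Set Int) num =>
      let seen := st.1
      let duplicates := st.2
      let duplicates :=
        if num ∈ seen ∧ num ∉ duplicates then PySem.Set.add duplicates num else duplicates
      (PySem.Set.add seen num, duplicates))
    (PySem.Set.empty, PySem.Set.empty)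
  PySem.List.sorted st.2 (fun x => x) false

-- ===== PORT B =====
-- for x in sorted(lst): if prev == x and (not res or res[-1] != x): res.append(x); prev = x
-- ('not res or res[-1] != x' is exactly 'res.getLast? ≠ some x'; 'prev == x' with prev = None is False)
def extractDup_alt (lst : List Int) : List Int :=
  ((PySem.List.sorted lst (fun x => x) false).foldl
    (fun (st : List Int × Option Int) x =>
      let res := st.1
      let res := if st.2 = some x ∧ res.getLast? ≠ some x then res ++ [x] else res
      (res, some x))
    ([], none)).1

-- ===== PRECONDITION & SPEC =====
def Spec_extractDup (lst : List Int) (out : List Int) : Prop := out = extractDup_alt lst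
instance (lst : List Int) (out : List Int) : Decidable (Spec_extractDup lst out) := by unfold Spec_extractDup; infer_instance

-- ===== CLAIM (what is proved, stated in full; the proofs are below) =====
def Claim_equal_extractDup : Prop := ∀ (lst : List Int), Dom_extractDup lst → Spec_extractDup lst (extractDup lst)

-- ===== LEMMAS AND PROOFS =====

-- A's loop invariant: membership in the duplicates set after the fold.
lemma extractDup_loop_mem (lst : List Int) (seen dup : PySem.Set Int) (x : Int) :
    (x ∈ (lst.foldl
      (fun (st : PySem.Set Int × PySem.Set Int) num =>
        let s := st.1
        let d := st.2
        let d := if num ∈ s ∧ num ∉ d then PySem.Set.add d num else d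
        (PySem.Set.add s num, d))
      (seen, dup)).2) ↔ (x ∈ dup ∨ (x ∈ seen ∧ x ∈ lst) ∨ 2 ≤ lst.count x) := by
  induction lst generalizing seen dup with
  | nil => simp
  | cons num rest ih =>
    simp only [List.foldl_cons, ih]
    by_cases hx : x = num
    · subst hx
      have hs : x ∈ PySem.Set.add seen x := by rw [PySem.Set.mem_add]; exact Or.inr rfl
      have hr : x ∈ rest ↔ 0 < rest.count x := List.count_pos_iff.symm
      have hcc : (x :: rest).count x = rest.count x + 1 := by simp
      rw [hcc]
      by_cases hd : x ∈ dup
      · rw [if_neg (by tauto)]; simp [hd]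
      · by_cases hsn : x ∈ seen
        · rw [if_pos ⟨hsn, hd⟩]
          have hda : x ∈ PySem.Set.add dup x := by rw [PySem.Set.mem_add]; exact Or.inr rfl
          simp [hda, hsn]
        · rw [if_neg (by tauto)]
          simp [hd, hsn]
          rw [hr]
          omega
    · have hs : x ∈ PySem.Set.add seen num ↔ x ∈ seen := by
        rw [PySem.Set.mem_add]; simp [hx]
      by_cases hcond : num ∈ seen ∧ num ∉ dup
      · rw [if_pos hcond]
        rw [PySem.Set.mem_add]
        simp [hx, hs, Ne.symm hx]
      · rw [if_neg hcond]
        simp [hs, hx, Ne.symm hx]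

lemma extractDup_loop_nodup (lst : List Int) (seen dup : PySem.Set Int) (hd : dup.Nodup) :
    (lst.foldl
      (fun (st : PySem.Set Int × PySem.Set Int) num =>
        let s := st.1
        let d := st.2
        let d := if num ∈ s ∧ num ∉ d then PySem.Set.add d num else d
        (PySem.Set.add s num, d))
      (seen, dup)).2.Nodup := by
  induction lst generalizing seen dup with
  | nil => simpa
  | cons num rest ih =>
    simp only [List.foldl_cons]
    apply ih
    by_cases hcond : num ∈ seen ∧ num ∉ dup
    · simpa [hcond] using PySem.Set.nodup_add dup num hd
    · simpa [hcond]

-- a strictly increasing list whose elements are all ≤ c and whose last is not c does not contain c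
lemma notmem_of_sorted_le_last_ne (res : List Int) (c : Int)
    (h1 : res.Pairwise (· < ·)) (h2 : ∀ a ∈ res, a ≤ c) (h3 : res.getLast? ≠ some c) :
    c ∉ res := by
  intro hc
  rcases res.eq_nil_or_concat with rfl | ⟨ys, y, rfl⟩
  · simp at hc
  · rw [List.concat_eq_append] at hc h1 h2 h3
    have hy : y = c := by
      have hle : y ≤ c := h2 y (by simp)
      rcases (List.mem_append.mp hc) with h | h
      · have : c < y := (List.pairwise_append.mp h1).2.2 c h y (by simp)
        omega
      · simp at h; omega
    exact h3 (by simp [hy])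

-- B's scan invariant on a ≤-sorted list: membership of the accumulated result and strict sortedness.
lemma scan_invariant (s : List Int) (res : List Int) (prev : Option Int)
    (hs : s.Pairwise (· ≤ ·))
    (hres : res.Pairwise (· < ·))
    (hprev : ∀ p, prev = some p → (∀ b ∈ s, p ≤ b) ∧ (∀ a ∈ res, a ≤ p))
    (hnone : prev = none → res = []) :
    (∀ x, x ∈ (s.foldl
        (fun (st : List Int × Option Int) x =>
          let r := st.1
          let r := if st.2 = some x ∧ r.getLast? ≠ some x then r ++ [x] else r
          (r, some x))
        (res, prev)).1
      ↔ (x ∈ res ∨ 2 ≤ s.count x ∨ (prev = some x ∧ x ∈ s ∧ res.getLast? ≠ some x)))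
    ∧ (s.foldl
        (fun (st : List Int × Option Int) x =>
          let r := st.1
          let r := if st.2 = some x ∧ r.getLast? ≠ some x then r ++ [x] else r
          (r, some x))
        (res, prev)).1.Pairwise (· < ·) := by
  induction s generalizing res prev with
  | nil => simp [hres]
  | cons c t ih =>
    have hct : ∀ b ∈ t, c ≤ b := fun b hb => (List.pairwise_cons.mp hs).1 b hb
    have ht : t.Pairwise (· ≤ ·) := (List.pairwise_cons.mp hs).2
    have hresc : ∀ a ∈ res, a ≤ c := by
      cases prev with
      | none => simp [hnone rfl]
      | some p =>
        intro a ha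
        have h := hprev p rfl
        exact le_trans (h.2 a ha) (h.1 c (by simp))
    simp only [List.foldl_cons]
    by_cases hcond : prev = some c ∧ res.getLast? ≠ some c
    · -- append branch
      have hcnot : c ∉ res := notmem_of_sorted_le_last_ne res c hres hresc hcond.2
      have hres' : (res ++ [c]).Pairwise (· < ·) := by
        rw [List.pairwise_append]
        refine ⟨hres, by simp, ?_⟩
        intro a ha b hb
        simp at hb; subst hb
        exact lt_of_le_of_ne (hresc a ha) (fun h => hcnot (h ▸ ha))
      have hprev' : ∀ p, (some c : Option Int) = some p →
          (∀ b ∈ t, p ≤ b) ∧ (∀ a ∈ res ++ [c], a ≤ p) := by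
        intro p hp; injection hp with hp; subst hp
        refine ⟨hct, ?_⟩
        intro a ha
        rcases List.mem_append.mp ha with h | h
        · exact hresc a h
        · simp at h; omega
      have := ih (res ++ [c]) (some c) ht hres' hprev' (by simp)
      rw [if_pos hcond]
      refine ⟨?_, this.2⟩
      intro x
      rw [(this.1 x)]
      by_cases hx : x = c
      · subst hx
        simp only [List.count_cons_self]
        constructor
        · intro _
          exact Or.inr (Or.inr ⟨hcond.1, by simp, hcond.2⟩)
        · intro _
          left; simp
      · have hxt : ((res ++ [c]).getLast? = some x) = False := by
          simp; intro h; exact absurd h.symm hx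
        have hcnt : (c :: t).count x = t.count x := by
          rw [List.count_cons]; simp [Ne.symm hx]
        constructor
        · rintro (h | h | h)
          · rcases List.mem_append.mp h with h | h
            · exact Or.inl h
            · simp at h; exact absurd h hx
          · rw [hcnt]; exact Or.inr (Or.inl h)
          · exact absurd (Option.some.inj h.1).symm hx
        · rintro (h | h | ⟨hp, hmem, hlast⟩)
          · exact Or.inl (List.mem_append.mpr (Or.inl h))
          · rw [hcnt] at h; exact Or.inr (Or.inl h)
          · -- prev = some x with x ≠ c is impossible together with x ∈ c :: t here
            exfalso
            have hpc : prev = some c := hcond.1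
            rw [hpc] at hp; injection hp with hp
            exact hx hp.symm
    · -- skip branch
      have hprev' : ∀ p, (some c : Option Int) = some p →
          (∀ b ∈ t, p ≤ b) ∧ (∀ a ∈ res, a ≤ p) := by
        intro p hp; injection hp with hp; subst hp
        exact ⟨hct, hresc⟩
      have := ih res (some c) ht hres hprev' (by simp)
      rw [if_neg hcond]
      refine ⟨?_, this.2⟩
      intro x
      rw [(this.1 x)]
      by_cases hx : x = c
      · subst hx
        simp only [List.count_cons_self]
        have hxt : x ∈ t ↔ 0 < t.count x := List.count_pos_iff.symm
        constructor
        · rintro (h | h | ⟨_, hmem, hlast⟩)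
          · exact Or.inl h
          · right; left; omega
          · right; left; rw [hxt] at hmem; omega
        · rintro (h | h | ⟨hp, _, hlast⟩)
          · exact Or.inl h
          · by_cases hgl : res.getLast? = some x
            · left
              rcases res.eq_nil_or_concat with rfl | ⟨ys, y, rfl⟩
              · simp at hgl
              · simp at hgl; subst hgl; simp
            · right; right
              exact ⟨by simp, by rw [hxt]; omega, hgl⟩
          · -- not-append: prev ≠ some x ∨ getLast? = some x
            rcases not_and_or.mp hcond with h | h
            · exact absurd hp h
            · left
              have hgl : res.getLast? = some x := not_not.mp h
              rcases res.eq_nil_or_concat with rfl | ⟨ys, y, rfl⟩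
              · simp at hgl
              · simp at hgl; subst hgl; simp
      · have hcnt : (c :: t).count x = t.count x := by
          rw [List.count_cons]; simp [Ne.symm hx]
        rw [hcnt]
        constructor
        · rintro (h | h | ⟨hp, hmem, hlast⟩)
          · exact Or.inl h
          · exact Or.inr (Or.inl h)
          · -- prev' = some c = some x contradicts x ≠ c
            exfalso; injection hp with hp; exact hx hp.symm
        · rintro (h | h | ⟨hp, hmem, hlast⟩)
          · exact Or.inl h
          · exact Or.inr (Or.inl h)
          · -- prev = some x, x ∈ c :: t, x ≠ c: then x ≤ c ≤ x forces x = c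
            exfalso
            have h1 := (hprev x hp).1
            have hxc : x ≤ c := h1 c (by simp)
            rcases (by simpa [hx] using hmem : x ∈ t) with hxt
            have : c ≤ x := hct x hxt
            exact hx (by omega)

theorem extractDup_spec : Claim_equal_extractDup := by
  intro lst _
  unfold Spec_extractDup extractDup extractDup_alt
  simp only []
  set s := PySem.List.sorted lst (fun x => x) false with hsdef
  have hsp : s.Pairwise (· ≤ ·) := by
    simpa using PySem.List.sorted_pairwise lst (fun x => x)
  have hperm : s.Perm lst := PySem.List.sorted_perm lst (fun x => x) false
  obtain ⟨hmem, hsorted⟩ := scan_invariant s [] none hsp (by simp) (by simp) (fun _ => rfl)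
  apply PySem.List.sorted_id_eq_of_perm_of_pairwise
  · -- the scan result is a permutation of A's duplicates set
    apply (List.perm_ext_iff_of_nodup hsorted.nodup
      (extractDup_loop_nodup lst _ _ (by simp [PySem.Set.empty]))).mpr
    intro x
    rw [hmem x, extractDup_loop_mem]
    have hcount : s.count x = lst.count x := hperm.count_eq x
    simp only [List.not_mem_nil, hcount]
    simp [PySem.Set.empty]
  · exact hsorted.imp le_of_lt
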